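-- pv_equiv track=rewrite | github.com/SarahisCode/advent-of-code | 2023/Day 12/2023 Day 12 part 2.py | old_works
-- ===== SOURCE A (Python) =====
-- def old_works(conditions, record):
--     current_group = 0
--     in_group = False
--     current_group_length = 0
--     for char in conditions:
--         if char == "#":
--             if in_group:
--                 current_group_length += 1
--             else:
--                 in_group = True
--                 current_group_length = 1
--         elif char == "." and in_group:
--             in_group = False
--             if current_group >= len(record):
--                 return False
--             elif not record[current_group] == current_group_length:
--                 return False
--             current_group_length = 0
--             current_group += 1
--     if in_group:
--         if current_group >= len(record):
--             return False
--         elif not record[current_group] == current_group_length: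
--             return False
--         current_group += 1
--     if current_group != len(record):
--         return False
--     return True
-- ===== SOURCE B (Python) =====
-- def old_works(conditions, record):
--     groups = [seg.count('#') for seg in conditions.split('.') if '#' in seg]
--     return groups == list(record)
-- ===== Notes on version B (the rewrite author's own statement) =====
-- stated objective: simpler
-- what changed: Replaced the incremental in_group/current_group state machine with a declarative parse: split on '.', take the '#'-count of each segment containing a '#', and compare that list of group lengths with record in one equality.
import Mathlib
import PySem

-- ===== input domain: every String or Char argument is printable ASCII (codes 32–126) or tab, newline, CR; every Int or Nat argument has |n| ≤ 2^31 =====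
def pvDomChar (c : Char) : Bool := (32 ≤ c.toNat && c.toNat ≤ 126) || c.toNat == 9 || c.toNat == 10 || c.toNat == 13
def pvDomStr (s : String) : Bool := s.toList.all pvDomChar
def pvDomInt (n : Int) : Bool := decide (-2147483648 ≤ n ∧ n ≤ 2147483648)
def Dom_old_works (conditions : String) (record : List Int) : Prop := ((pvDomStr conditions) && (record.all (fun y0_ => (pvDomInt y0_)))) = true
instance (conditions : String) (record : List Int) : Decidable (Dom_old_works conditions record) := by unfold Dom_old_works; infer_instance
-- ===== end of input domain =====

-- B replaces A's incremental in_group/current_group state machine with a declarative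
-- parse (split on '.', count '#' per segment, compare the list with record): simpler.

-- ===== PORT A =====
-- A's for-loop over the characters, with early returns, as structural recursion over
-- the same state (current_group, in_group, current_group_length); the [] case is the
-- code after the loop. record[current_group] is guarded by current_group < len(record)
-- in A, so getD is exact here.
def old_worksAux (record : List Int) : List Char → Nat → Bool → Int → Bool
  | [], cg, ing, cgl =>
    if ing then
      if record.length ≤ cg then false
      else if ¬ (record.getD cg 0 = cgl) then false
      else decide (cg + 1 = record.length)
    else decide (cg = record.length)
  | c :: t, cg, ing, cgl =>
    if c = '#' then
      if ing then old_worksAux record t cg true (cgl + 1)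
      else old_worksAux record t cg true 1
    else if c = '.' ∧ ing then
      if record.length ≤ cg then false
      else if ¬ (record.getD cg 0 = cgl) then false
      else old_worksAux record t (cg + 1) false 0
    else old_worksAux record t cg ing cgl

def old_works (conditions : String) (record : List Int) : Bool :=
  old_worksAux record conditions.toList 0 false 0

-- ===== PORT B =====
-- hand port of conditions.split('.')  (Python semantics: ''.split('.') = [''])
def pvSplitDot : List Char → List (List Char)
  | [] => [[]]
  | c :: t =>
    if c = '.' then [] :: pvSplitDot t
    else
      match pvSplitDot t with
      | s :: rest => (c :: s) :: rest
      | [] => [[c]]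

-- the list comprehension: [seg.count('#') for seg in segs if '#' in seg]
def pvGroups (segs : List (List Char)) : List Int :=
  (segs.filter (fun s => s.contains '#')).map (fun s => (s.count '#' : Int))

def old_works_alt (conditions : String) (record : List Int) : Bool :=
  pvGroups (pvSplitDot conditions.toList) == record

-- ===== PRECONDITION & SPEC =====
def Spec_old_works (conditions : String) (record : List Int) (out : Bool) : Prop := out = old_works_alt conditions record
instance (conditions : String) (record : List Int) (out : Bool) : Decidable (Spec_old_works conditions record out) := by unfold Spec_old_works; infer_instance

-- ===== CLAIM (what is proved, stated in full; the proofs are below) =====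
def Claim_equal_old_works : Prop := ∀ (conditions : String) (record : List Int), Dom_old_works conditions record → Spec_old_works conditions record (old_works conditions record)

-- ===== LEMMAS AND PROOFS =====

-- the group lengths still to be produced from the remaining characters, given the
-- in-group flag and the current partial group length (mirrors A's branch structure)
def pvPend : List Char → Bool → Int → List Int
  | [], ing, cgl => if ing then [cgl] else []
  | c :: t, ing, cgl =>
    if c = '#' then
      if ing then pvPend t true (cgl + 1) else pvPend t true 1
    else if c = '.' ∧ ing then cgl :: pvPend t false 0
    else pvPend t ing cgl

-- definitional-equation lemmas for pvPend and old_worksAux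
theorem pend_nil_t (cgl : Int) : pvPend [] true cgl = [cgl] := rfl
theorem pend_nil_f (cgl : Int) : pvPend [] false cgl = [] := rfl
theorem pend_hash_t (t : List Char) (cgl : Int) :
    pvPend ('#' :: t) true cgl = pvPend t true (cgl + 1) := rfl
theorem pend_hash_f (t : List Char) (cgl : Int) :
    pvPend ('#' :: t) false cgl = pvPend t true 1 := rfl
theorem pend_dot_t (t : List Char) (cgl : Int) :
    pvPend ('.' :: t) true cgl = cgl :: pvPend t false 0 := rfl
theorem pend_dot_f (t : List Char) (cgl : Int) :
    pvPend ('.' :: t) false cgl = pvPend t false cgl := rfl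
theorem pend_other (c : Char) (t : List Char) (ing : Bool) (cgl : Int)
    (hh : ¬ c = '#') (hd : ¬ (c = '.' ∧ ing = true)) :
    pvPend (c :: t) ing cgl = pvPend t ing cgl := by
  simp [pvPend, hh, hd]

theorem aux_nil_t (record : List Int) (cg : Nat) (cgl : Int) :
    old_worksAux record [] cg true cgl =
      if record.length ≤ cg then false
      else if ¬ (record.getD cg 0 = cgl) then false
      else decide (cg + 1 = record.length) := rfl
theorem aux_nil_f (record : List Int) (cg : Nat) (cgl : Int) :
    old_worksAux record [] cg false cgl = decide (cg = record.length) := rfl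
theorem aux_hash_t (record : List Int) (t : List Char) (cg : Nat) (cgl : Int) :
    old_worksAux record ('#' :: t) cg true cgl = old_worksAux record t cg true (cgl + 1) := rfl
theorem aux_hash_f (record : List Int) (t : List Char) (cg : Nat) (cgl : Int) :
    old_worksAux record ('#' :: t) cg false cgl = old_worksAux record t cg true 1 := rfl
theorem aux_dot_t (record : List Int) (t : List Char) (cg : Nat) (cgl : Int) :
    old_worksAux record ('.' :: t) cg true cgl =
      if record.length ≤ cg then false
      else if ¬ (record.getD cg 0 = cgl) then false
      else old_worksAux record t (cg + 1) false 0 := rfl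
theorem aux_other (record : List Int) (c : Char) (t : List Char) (cg : Nat) (ing : Bool)
    (cgl : Int) (hh : ¬ c = '#') (hd : ¬ (c = '.' ∧ ing = true)) :
    old_worksAux record (c :: t) cg ing cgl = old_worksAux record t cg ing cgl := by
  simp [old_worksAux, hh, hd]

theorem pvBeqInt (a b : List Int) : (a == b) = decide (a = b) := by
  by_cases h : a = b <;> simp [h]

theorem pvGroups_cons (s : List Char) (rest : List (List Char)) :
    pvGroups (s :: rest) =
      if s.contains '#' then (s.count '#' : Int) :: pvGroups rest else pvGroups rest := by
  simp only [pvGroups, List.filter_cons]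
  split <;> simp

theorem old_worksAux_eq_pend (record : List Int) :
    ∀ (cs : List Char) (cg : Nat) (ing : Bool) (cgl : Int), cg ≤ record.length →
      old_worksAux record cs cg ing cgl = (record.drop cg == pvPend cs ing cgl) := by
  intro cs
  induction cs with
  | nil =>
    intro cg ing cgl hcg
    cases ing with
    | false =>
      rw [aux_nil_f, pend_nil_f, pvBeqInt, decide_eq_decide, List.drop_eq_nil_iff]
      omega
    | true =>
      rw [aux_nil_t, pend_nil_t]
      by_cases h : record.length ≤ cg
      · rw [if_pos h, List.drop_eq_nil_of_le h]
        simp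
      · have hlt : cg < record.length := by omega
        have hdrop : record.drop cg = record[cg] :: record.drop (cg + 1) :=
          List.drop_eq_getElem_cons hlt
        have hget : record.getD cg 0 = record[cg] := List.getD_eq_getElem _ _ hlt
        rw [if_neg h, hget, hdrop, pvBeqInt]
        by_cases he : record[cg] = cgl
        · rw [if_neg (by simp [he]), decide_eq_decide]
          simp only [List.cons.injEq, he, List.drop_eq_nil_iff, true_and]
          omega
        · rw [if_pos (by simp [he]), eq_comm, decide_eq_false_iff_not]
          intro hcons
          injection hcons with h1 _
          exact he h1
  | cons c t ih =>
    intro cg ing cgl hcg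
    by_cases hh : c = '#'
    · subst hh
      cases ing with
      | true => rw [aux_hash_t, pend_hash_t, ih _ _ _ hcg]
      | false => rw [aux_hash_f, pend_hash_f, ih _ _ _ hcg]
    · by_cases hd : c = '.' ∧ ing = true
      · obtain ⟨hc, hing⟩ := hd
        subst hc; subst hing
        rw [aux_dot_t, pend_dot_t]
        by_cases h : record.length ≤ cg
        · rw [if_pos h, List.drop_eq_nil_of_le h]
          simp
        · have hlt : cg < record.length := by omega
          have hdrop : record.drop cg = record[cg] :: record.drop (cg + 1) :=
            List.drop_eq_getElem_cons hlt
          have hget : record.getD cg 0 = record[cg] := List.getD_eq_getElem _ _ hlt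
          rw [if_neg h, hget, hdrop]
          by_cases he : record[cg] = cgl
          · rw [if_neg (by simp [he]), ih _ _ _ (by omega), pvBeqInt, pvBeqInt,
              decide_eq_decide]
            simp [he]
          · rw [if_pos (by simp [he]), pvBeqInt, eq_comm, decide_eq_false_iff_not]
            intro hcons
            injection hcons with h1 _
            exact he h1
      · rw [aux_other record c t cg ing cgl hh hd, pend_other c t ing cgl hh hd,
          ih _ _ _ hcg]

theorem pvSplitDot_ne_nil : ∀ cs : List Char, pvSplitDot cs ≠ [] := by
  intro cs
  cases cs with
  | nil => simp [pvSplitDot]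
  | cons c t =>
    simp only [pvSplitDot]
    split
    · simp
    · split <;> simp

theorem pend_split : ∀ cs : List Char,
    (∀ cgl : Int, pvPend cs true cgl =
      match pvSplitDot cs with
      | s :: rest => (cgl + (s.count '#' : Int)) :: pvGroups rest
      | [] => []) ∧
    (∀ cgl : Int, pvPend cs false cgl = pvGroups (pvSplitDot cs)) := by
  intro cs
  induction cs with
  | nil =>
    constructor <;> intro cgl <;> simp [pvPend, pvSplitDot, pvGroups]
  | cons c t ih =>
    obtain ⟨ihT, ihF⟩ := ih
    by_cases hd : c = '.'
    · subst hd
      have hs : pvSplitDot ('.' :: t) = [] :: pvSplitDot t := by simp [pvSplitDot]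
      constructor <;> intro cgl
      · rw [pend_dot_t, ihF, hs]
        show cgl :: pvGroups (pvSplitDot t) =
          (cgl + ((List.count '#' ([] : List Char)) : Int)) :: pvGroups (pvSplitDot t)
        simp
      · rw [pend_dot_f, ihF, hs, pvGroups_cons]
        simp
    · obtain ⟨s, rest, hsr⟩ : ∃ s rest, pvSplitDot t = s :: rest := by
        cases h : pvSplitDot t with
        | nil => exact absurd h (pvSplitDot_ne_nil t)
        | cons s rest => exact ⟨s, rest, rfl⟩
      have hsplit : pvSplitDot (c :: t) = (c :: s) :: rest := by
        simp [pvSplitDot, hd, hsr]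
      by_cases hh : c = '#'
      · subst hh
        have hcnt : ('#' :: s).count '#' = s.count '#' + 1 := by
          simp
        have hcontains : ('#' :: s).contains '#' = true := by
          simp
        constructor <;> intro cgl
        · rw [pend_hash_t, ihT, hsr, hsplit]
          show (cgl + 1 + ((List.count '#' s : Int))) :: pvGroups rest =
            (cgl + ((List.count '#' ('#' :: s) : Int))) :: pvGroups rest
          rw [hcnt]
          push_cast
          ring_nf
        · rw [pend_hash_f, ihT, hsr, hsplit, pvGroups_cons, if_pos hcontains, hcnt]
          show ((1 : Int) + (List.count '#' s : Int)) :: pvGroups rest =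
            ((List.count '#' s + 1 : Nat) : Int) :: pvGroups rest
          push_cast
          ring_nf
      · have hcnt : (c :: s).count '#' = s.count '#' := by
          simp [hh]
        have hcontains : (c :: s).contains '#' = s.contains '#' := by
          simp only [List.contains_cons]
          simp
          exact fun h => absurd h.symm hh
        constructor <;> intro cgl
        · rw [pend_other c t true cgl hh (by simp [hd]), ihT, hsr, hsplit]
          show (cgl + ((List.count '#' s : Int))) :: pvGroups rest =
            (cgl + ((List.count '#' (c :: s) : Int))) :: pvGroups rest
          rw [hcnt]
        · rw [pend_other c t false cgl hh (by simp [hd]), ihF, hsr, hsplit,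
            pvGroups_cons, pvGroups_cons, hcnt, hcontains]

theorem list_beq_comm (a b : List Int) : (a == b) = (b == a) := by
  by_cases h : a = b
  · simp [h]
  · have h' : ¬ b = a := fun e => h e.symm
    simp [h, h']

-- ===== VERDICT (by name: the statement is the Claim_ definition above) =====
theorem old_works_spec : Claim_equal_old_works := by
  intro conditions record _
  unfold Spec_old_works old_works old_works_alt
  rw [old_worksAux_eq_pend record _ 0 false 0 (Nat.zero_le _),
    (pend_split conditions.toList).2 0, List.drop_zero, list_beq_comm]
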